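-- pv_equiv track=rewrite | github.com/sickwell6988/CHCleaner | lists_composer.py | compose_user_table
-- ===== SOURCE A (Python) =====
-- def compose_user_table(data_from_api) :
--     user_dict_list = data_from_api
--
--     def append_user_data(user_data):
--         data_list = []
--         for dicts in user_dict_list:
--             data_list.append(dicts[user_data])
--         return data_list
--
--     user_id_list = append_user_data(user_data='user_id')
--     user_nick_list = append_user_data(user_data='username')
--     user_name_list = append_user_data(user_data='name')
--
--     user_data_list = list(zip(user_id_list, user_nick_list, user_name_list))
--     user_data_list_sorted = sorted(user_data_list, key=lambda user:user[0], reverse=True)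
--
--     return user_data_list_sorted
-- ===== SOURCE B (Python) =====
-- def compose_user_table(data_from_api):
--     # Sort the raw dicts first (stable, descending by user_id), then extract fields in one pass.
--     ordered = sorted(data_from_api, key=lambda d: d['user_id'], reverse=True)
--     return [(d['user_id'], d['username'], d['name']) for d in ordered]
-- ===== Notes on version B (the rewrite author's own statement) =====
-- stated objective: simpler
-- what changed: B sorts the dict records themselves (stable, descending by user_id) and then extracts the three fields in a single comprehension pass, instead of A's three separate field-extraction passes, zip, and a sort of the tuples.
import Mathlib
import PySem

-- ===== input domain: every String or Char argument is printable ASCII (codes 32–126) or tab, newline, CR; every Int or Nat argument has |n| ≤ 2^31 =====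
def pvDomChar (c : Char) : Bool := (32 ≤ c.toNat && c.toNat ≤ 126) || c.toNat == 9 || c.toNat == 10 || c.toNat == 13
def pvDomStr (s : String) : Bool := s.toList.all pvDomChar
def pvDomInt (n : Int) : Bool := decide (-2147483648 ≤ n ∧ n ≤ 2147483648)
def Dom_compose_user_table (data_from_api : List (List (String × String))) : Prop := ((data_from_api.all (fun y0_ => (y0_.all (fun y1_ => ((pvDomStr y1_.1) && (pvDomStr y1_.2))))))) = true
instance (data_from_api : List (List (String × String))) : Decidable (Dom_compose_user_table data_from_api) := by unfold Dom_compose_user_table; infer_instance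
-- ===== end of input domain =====

-- B sorts the dict records themselves (stable, descending by user_id) and extracts the three
-- fields in a single pass, instead of A's three extraction passes + zip + sort (objective: simpler).


-- ===== PORT A =====
-- dicts[k] (KeyError on a missing key is excluded by Pre_; there the port yields "")
def pvLookup (d : List (String × String)) (k : String) : String :=
  (PySem.Dict.mk d).getD k ""

-- the inner helper append_user_data: one pass over user_dict_list collecting dicts[user_data]
def appendUserData (user_dict_list : List (List (String × String))) (user_data : String) : List String :=
  user_dict_list.foldl (fun data_list dicts => data_list ++ [pvLookup dicts user_data]) []

def compose_user_table (data_from_api : List (List (String × String))) : List (String × String × String) :=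
  let user_id_list := appendUserData data_from_api "user_id"
  let user_nick_list := appendUserData data_from_api "username"
  let user_name_list := appendUserData data_from_api "name"
  let user_data_list := user_id_list.zip (user_nick_list.zip user_name_list)
  PySem.List.sorted user_data_list (fun user => user.1) true

-- ===== PORT B =====
def compose_user_table_alt (data_from_api : List (List (String × String))) : List (String × String × String) :=
  let ordered := PySem.List.sorted data_from_api (fun d => pvLookup d "user_id") true
  ordered.map (fun d => (pvLookup d "user_id", pvLookup d "username", pvLookup d "name"))

-- ===== PRECONDITION & SPEC =====
-- Pre_ excludes exactly the inputs on which Python A raises KeyError: a dict missing one of the three keys.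
def Pre_compose_user_table (data_from_api : List (List (String × String))) : Prop :=
  ∀ d ∈ data_from_api, "user_id" ∈ d.map Prod.fst ∧ "username" ∈ d.map Prod.fst ∧ "name" ∈ d.map Prod.fst
instance (data_from_api : List (List (String × String))) : Decidable (Pre_compose_user_table data_from_api) := by unfold Pre_compose_user_table; infer_instance

def pvWitness_compose_user_table : (List (List (String × String))) :=
  [[("user_id", "7"), ("username", "kzq"), ("name", "Q!")],
   [("user_id", "31"), ("username", "mvx"), ("name", "Z z")],
   [("user_id", "7"), ("username", "ae_1"), ("name", "T")]]

def Spec_compose_user_table (data_from_api : List (List (String × String))) (out : List (String × String × String)) : Prop := out = compose_user_table_alt data_from_api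
instance (data_from_api : List (List (String × String))) (out : List (String × String × String)) : Decidable (Spec_compose_user_table data_from_api out) := by unfold Spec_compose_user_table; infer_instance

-- ===== CLAIM (what is proved, stated in full; the proofs are below) =====
def Claim_equal_compose_user_table : Prop := ∀ (data_from_api : List (List (String × String))), Dom_compose_user_table data_from_api → Pre_compose_user_table data_from_api → Spec_compose_user_table data_from_api (compose_user_table data_from_api)

-- ===== LEMMAS AND PROOFS =====

-- A's accumulator loop builds acc ++ map
theorem appendUserData_loop (k : String) (xs : List (List (String × String))) (acc : List String) :
    xs.foldl (fun data_list dicts => data_list ++ [pvLookup dicts k]) acc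
      = acc ++ xs.map (fun d => pvLookup d k) := by
  induction xs generalizing acc with
  | nil => simp
  | cons d t ih => simp [List.foldl, ih]

theorem appendUserData_eq_map (k : String) (xs : List (List (String × String))) :
    appendUserData xs k = xs.map (fun d => pvLookup d k) := by
  unfold appendUserData
  rw [appendUserData_loop]
  simp

-- zip of three maps over the same list is one map of the triple
theorem zip3_map (g h i : α → String) (xs : List α) :
    (xs.map g).zip ((xs.map h).zip (xs.map i))
      = xs.map (fun x => (g x, h x, i x)) := by
  induction xs with
  | nil => rfl
  | cons x t ih => simp [ih]

-- map commutes with insertBy when the predicates correspond through f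
theorem map_insertBy (f : α → β) (p : β → β → Bool) (q : α → α → Bool)
    (hpq : ∀ a b, q a b = p (f a) (f b)) (x : α) (ys : List α) :
    (PySem.List.insertBy q x ys).map f = PySem.List.insertBy p (f x) (ys.map f) := by
  induction ys with
  | nil => rfl
  | cons y t ih =>
    simp only [PySem.List.insertBy, List.map, hpq]
    split_ifs <;> simp [ih]

-- hence map commutes with the insertion-sort fold
theorem map_foldl_insertBy (f : α → β) (p : β → β → Bool) (q : α → α → Bool)
    (hpq : ∀ a b, q a b = p (f a) (f b)) (xs : List α) (acc : List α) :
    (xs.foldl (fun acc x => PySem.List.insertBy q x acc) acc).map f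
      = (xs.map f).foldl (fun acc x => PySem.List.insertBy p x acc) (acc.map f) := by
  induction xs generalizing acc with
  | nil => rfl
  | cons x t ih => simp [List.foldl, ih, map_insertBy f p q hpq]

theorem sorted_rev_map (f : α → β) (key : β → String) (xs : List α) :
    PySem.List.sorted (xs.map f) key true
      = (PySem.List.sorted xs (fun x => key (f x)) true).map f := by
  rw [PySem.List.sorted_rev_eq_foldl_insertBy, PySem.List.sorted_rev_eq_foldl_insertBy,
    map_foldl_insertBy f (fun a b => decide (key b < key a))
      (fun a b => decide (key (f b) < key (f a))) (fun _ _ => rfl)]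
  rfl

-- ===== VERDICT (by name: the statement is the Claim_ definition above) =====
theorem compose_user_table_spec : Claim_equal_compose_user_table := by
  intro xs _ _
  unfold Spec_compose_user_table compose_user_table compose_user_table_alt
  simp only [appendUserData_eq_map, zip3_map]
  exact sorted_rev_map (fun d => (pvLookup d "user_id", pvLookup d "username", pvLookup d "name"))
    (fun u => u.1) xs
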